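-- pv_equiv track=rewrite | github.com/kirillNevedrov/data-structures | src/solutions/t_8_1/sln.py | count_paths_3
-- ===== SOURCE A (Python) =====
-- from typing import Dict
--
-- def count_paths_3(steps: int) -> int:
--     memo: Dict[int, int] = {}
--
--     memo[1] = 1
--     memo[2] = 0
--     memo[3] = 0
--
--     hops = [1, 2, 3]
--
--     for _ in range(1, steps + 1):
--         sum = 0
--         for hop in hops:
--             sum += memo[hop]
--
--         memo[3] = memo[2]
--         memo[2] = memo[1]
--         memo[1] = sum
--
--     return memo[1]
-- ===== SOURCE B (Python) =====
-- _I = ((1, 0, 0), (0, 1, 0), (0, 0, 1))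
-- _M = ((1, 1, 1), (1, 0, 0), (0, 1, 0))
--
--
-- def _mul(x, y):
--     (a, b, c), (d, e, f), (g, h, i) = x
--     (p, q, r), (s, t, u), (v, w, z) = y
--     return (
--         (a * p + b * s + c * v, a * q + b * t + c * w, a * r + b * u + c * z),
--         (d * p + e * s + f * v, d * q + e * t + f * w, d * r + e * u + f * z),
--         (g * p + h * s + i * v, g * q + h * t + i * w, g * r + h * u + i * z),
--     )
--
--
-- def _pow(n):
--     if n == 0:
--         return _I
--     h = _pow(n // 2)
--     h2 = _mul(h, h)
--     return _mul(h2, _M) if n % 2 == 1 else h2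
--
--
-- def count_paths_3(steps: int) -> int:
--     if steps <= 0:
--         return 1
--     return _pow(steps)[0][0]
-- ===== Notes on version B (the rewrite author's own statement) =====
-- stated objective: faster
-- what changed: Replaces the step-by-step linear recurrence loop over a dict with binary exponentiation of the 3x3 tribonacci transition matrix.
import Mathlib
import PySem

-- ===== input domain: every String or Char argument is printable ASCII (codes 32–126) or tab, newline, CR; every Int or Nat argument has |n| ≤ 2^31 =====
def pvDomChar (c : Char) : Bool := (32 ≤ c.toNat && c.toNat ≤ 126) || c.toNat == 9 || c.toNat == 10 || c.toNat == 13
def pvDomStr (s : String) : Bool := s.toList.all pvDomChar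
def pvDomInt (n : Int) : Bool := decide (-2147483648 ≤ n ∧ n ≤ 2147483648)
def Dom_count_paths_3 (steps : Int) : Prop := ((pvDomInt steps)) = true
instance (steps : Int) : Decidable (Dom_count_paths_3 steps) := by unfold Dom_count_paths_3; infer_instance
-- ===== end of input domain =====

-- B replaces A's step-by-step linear-recurrence loop by binary exponentiation of the 3x3 transition matrix (objective: faster).

-- ===== PORT A =====
-- memo[hop] always hits a present key (1,2,3), so `.getD 0` never takes the default branch: exact.
def count_paths_3 (steps : Int) : Int :=
  let memo : PySem.Dict Int Int :=
    (((PySem.Dict.empty).insert 1 1).insert 2 0).insert 3 0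
  let hops : List Int := [1, 2, 3]
  let memo := (PySem.List.pyRange 1 (steps + 1) 1).foldl (fun memo _ =>
    let sum := hops.foldl (fun s hop => s + (memo.get? hop).getD 0) 0
    let memo := memo.insert 3 ((memo.get? 2).getD 0)
    let memo := memo.insert 2 ((memo.get? 1).getD 0)
    memo.insert 1 sum) memo
  (memo.get? 1).getD 0

-- ===== PORT B =====
abbrev pvMat3 : Type := (Int × Int × Int) × (Int × Int × Int) × (Int × Int × Int)

def pvI : pvMat3 := ((1, 0, 0), (0, 1, 0), (0, 0, 1))
def pvM : pvMat3 := ((1, 1, 1), (1, 0, 0), (0, 1, 0))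

def pvMul (x y : pvMat3) : pvMat3 :=
  let ((a, b, c), (d, e, f), (g, h, i)) := x
  let ((p, q, r), (s, t, u), (v, w, z)) := y
  ((a * p + b * s + c * v, a * q + b * t + c * w, a * r + b * u + c * z),
   (d * p + e * s + f * v, d * q + e * t + f * w, d * r + e * u + f * z),
   (g * p + h * s + i * v, g * q + h * t + i * w, g * r + h * u + i * z))

def pvPow : Nat → pvMat3
  | 0 => pvI
  | n + 1 =>
    let h := pvPow ((n + 1) / 2)
    let h2 := pvMul h h
    if (n + 1) % 2 == 1 then pvMul h2 pvM else h2
decreasing_by omega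

def count_paths_3_alt (steps : Int) : Int :=
  if steps ≤ 0 then 1 else (pvPow steps.toNat).1.1

-- ===== PRECONDITION & SPEC =====
def Spec_count_paths_3 (steps : Int) (out : Int) : Prop := out = count_paths_3_alt steps
instance (steps : Int) (out : Int) : Decidable (Spec_count_paths_3 steps out) := by unfold Spec_count_paths_3; infer_instance

-- ===== CLAIM (what is proved, stated in full; the proofs are below) =====
def Claim_equal_count_paths_3 : Prop := ∀ (steps : Int), Dom_count_paths_3 steps → Spec_count_paths_3 steps (count_paths_3 steps)

-- ===== LEMMAS AND PROOFS =====

-- the tribonacci state step and its n-fold application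
def pvStep : Int × Int × Int → Int × Int × Int
  | (a, b, c) => (a + b + c, a, b)

def pvIter : Nat → Int × Int × Int → Int × Int × Int
  | 0, v => v
  | n + 1, v => pvIter n (pvStep v)

-- matrix applied to a column vector
def pvApp (m : pvMat3) (v : Int × Int × Int) : Int × Int × Int :=
  let ((a, b, c), (d, e, f), (g, h, i)) := m
  let (x, y, z) := v
  (a * x + b * y + c * z, d * x + e * y + f * z, g * x + h * y + i * z)

-- unary power (right-multiplication), the bridge between pvPow and pvIter
def pvUPow : Nat → pvMat3
  | 0 => pvI
  | n + 1 => pvMul (pvUPow n) pvM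

lemma pvMul_assoc (x y z : pvMat3) : pvMul (pvMul x y) z = pvMul x (pvMul y z) := by
  obtain ⟨⟨a, b, c⟩, ⟨d, e, f⟩, g, h, i⟩ := x
  obtain ⟨⟨p, q, r⟩, ⟨s, t, u⟩, v, w, zz⟩ := y
  obtain ⟨⟨a', b', c'⟩, ⟨d', e', f'⟩, g', h', i'⟩ := z
  simp only [pvMul, Prod.mk.injEq]
  and_intros <;> ring

lemma pvMul_one (x : pvMat3) : pvMul x pvI = x := by
  obtain ⟨⟨a, b, c⟩, ⟨d, e, f⟩, g, h, i⟩ := x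
  simp only [pvMul, pvI, Prod.mk.injEq]
  and_intros <;> ring

lemma pvUPow_add (m n : Nat) : pvUPow (m + n) = pvMul (pvUPow m) (pvUPow n) := by
  induction n with
  | zero => simp [pvUPow, pvMul_one]
  | succ n ih =>
      show pvUPow ((m + n) + 1) = _
      simp only [pvUPow, ih, pvMul_assoc]

lemma pvPow_eq_upow (n : Nat) : pvPow n = pvUPow n := by
  induction n using Nat.strong_induction_on with
  | _ n ih =>
    match n with
    | 0 => rw [pvPow]; rfl
    | n + 1 =>
      have hlt : (n + 1) / 2 < n + 1 := by omega
      rw [pvPow]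
      simp only [ih _ hlt]
      by_cases hodd : (n + 1) % 2 = 1
      · have h2 : (n + 1) / 2 + ((n + 1) / 2 + 1) = n + 1 := by omega
        simp only [hodd, beq_self_eq_true, if_true]
        conv_rhs => rw [← h2, pvUPow_add]
        simp only [pvUPow, pvMul_assoc]
      · have heq : ((n + 1) % 2 == 1) = false := by simpa using hodd
        have h2 : (n + 1) / 2 + (n + 1) / 2 = n + 1 := by omega
        rw [heq]
        simp only [Bool.false_eq_true, if_false, ← pvUPow_add, h2]

lemma pvApp_mul (x y : pvMat3) (v : Int × Int × Int) :
    pvApp (pvMul x y) v = pvApp x (pvApp y v) := by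
  obtain ⟨⟨a, b, c⟩, ⟨d, e, f⟩, g, h, i⟩ := x
  obtain ⟨⟨p, q, r⟩, ⟨s, t, u⟩, vv, w, zz⟩ := y
  obtain ⟨x1, x2, x3⟩ := v
  simp only [pvMul, pvApp, Prod.mk.injEq]
  and_intros <;> ring

lemma pvApp_M (v : Int × Int × Int) : pvApp pvM v = pvStep v := by
  obtain ⟨a, b, c⟩ := v
  simp only [pvM, pvApp, pvStep, Prod.mk.injEq]
  and_intros <;> ring

lemma pvUPow_app (n : Nat) (v : Int × Int × Int) :
    pvApp (pvUPow n) v = pvIter n v := by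
  induction n generalizing v with
  | zero =>
      obtain ⟨a, b, c⟩ := v
      simp only [pvUPow, pvI, pvApp, pvIter, Prod.mk.injEq]
      and_intros <;> ring
  | succ n ih =>
      simp only [pvUPow, pvApp_mul, pvApp_M, pvIter, ih]

-- A's loop, folded over an arbitrary index list, iterates pvStep on the dict's three values
lemma pvFoldl_iter (f : PySem.Dict Int Int → Int → PySem.Dict Int Int)
    (hf : ∀ (a b c x : Int), f (PySem.Dict.mk [(1, a), (2, b), (3, c)]) x
            = PySem.Dict.mk [(1, a + b + c), (2, a), (3, b)])
    (l : List Int) (a b c : Int) :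
    l.foldl f (PySem.Dict.mk [(1, a), (2, b), (3, c)])
      = (fun t : Int × Int × Int => PySem.Dict.mk [(1, t.1), (2, t.2.1), (3, t.2.2)])
          (pvIter l.length (a, b, c)) := by
  induction l generalizing a b c with
  | nil => rfl
  | cons x xs ih =>
      rw [List.foldl_cons, hf, ih]
      rfl

-- ===== VERDICT (by name: the statement is the Claim_ definition above) =====
theorem count_paths_3_spec : Claim_equal_count_paths_3 := by
  intro steps _
  unfold Spec_count_paths_3 count_paths_3 count_paths_3_alt
  have hmk : (((PySem.Dict.empty : PySem.Dict Int Int).insert 1 1).insert 2 0).insert 3 0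
      = PySem.Dict.mk [(1, 1), (2, 0), (3, 0)] := by decide
  simp only [hmk]
  rw [pvFoldl_iter _ (by
    intro a b c x
    apply PySem.Dict.ext
    simp [PySem.Dict.get?, PySem.Dict.insert, PySem.Dict.contains, List.foldl])]
  rw [PySem.List.length_pyRange_one]
  by_cases h : steps ≤ 0
  · have h0 : (steps + 1 - 1).toNat = 0 := by omega
    rw [h0]
    simp [pvIter, h, PySem.Dict.get?]
  · have hn : (steps + 1 - 1).toNat = steps.toNat := by omega
    rw [hn, pvPow_eq_upow]
    have happ := pvUPow_app steps.toNat (1, 0, 0)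
    have h11 : pvApp (pvUPow steps.toNat) (1, 0, 0) = ((pvUPow steps.toNat).1.1,
        (pvUPow steps.toNat).2.1.1, (pvUPow steps.toNat).2.2.1) := by
      obtain ⟨⟨A1, B1, C1⟩, ⟨D1, E1, F1⟩, G1, H1, I1⟩ := pvUPow steps.toNat
      simp only [pvApp, Prod.mk.injEq]
      and_intros <;> ring
    rw [h11] at happ
    simp [h, ← happ, PySem.Dict.get?]
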